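-- pv_equiv track=rewrite | github.com/RiverAge/semantune | src/core/migration/manager.py | _split_sql
-- ===== SOURCE A (Python) =====
-- from typing import List, Dict, Any, Optional
--
-- def _split_sql(sql: str) -> List[str]:
--     """
--     分割 SQL 语句
--
--     Args:
--         sql: SQL 字符串
--
--     Returns:
--         SQL 语句列表
--     """
--     # 简单的分割逻辑，按分号分割
--     statements = []
--     current = []
--
--     for line in sql.split('\n'):
--         line = line.strip()
--         if not line or line.startswith('--'):
--             continue
--
--         current.append(line)
--
--         if line.endswith(';'):
--             statements.append('\n'.join(current))
--             current = []
--
--     if current: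
--         statements.append('\n'.join(current))
--
--     return statements
-- ===== SOURCE B (Python) =====
-- from typing import List
--
-- def _split_sql(sql: str) -> List[str]:
--     # Clean once: strip every line, keep non-empty non-comment lines.
--     lines = [l for l in (raw.strip() for raw in sql.split('\n')) if l and not l.startswith('--')]
--     statements = []
--     # Repeatedly cut the cleaned list at the first line ending with ';'.
--     while lines:
--         j = next((i for i, l in enumerate(lines) if l.endswith(';')), None)
--         if j is None:
--             statements.append('\n'.join(lines))
--             break
--         statements.append('\n'.join(lines[:j + 1]))
--         lines = lines[j + 1:]
--     return statements
-- ===== Notes on version B (the rewrite author's own statement) =====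
-- stated objective: alternative
-- what changed: Replaces the accumulate-and-flush loop with interleaved filtering by a single cleaning pass (strip+filter) followed by repeated splitting of the cleaned list at the first ';'-terminated line.
import Mathlib
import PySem

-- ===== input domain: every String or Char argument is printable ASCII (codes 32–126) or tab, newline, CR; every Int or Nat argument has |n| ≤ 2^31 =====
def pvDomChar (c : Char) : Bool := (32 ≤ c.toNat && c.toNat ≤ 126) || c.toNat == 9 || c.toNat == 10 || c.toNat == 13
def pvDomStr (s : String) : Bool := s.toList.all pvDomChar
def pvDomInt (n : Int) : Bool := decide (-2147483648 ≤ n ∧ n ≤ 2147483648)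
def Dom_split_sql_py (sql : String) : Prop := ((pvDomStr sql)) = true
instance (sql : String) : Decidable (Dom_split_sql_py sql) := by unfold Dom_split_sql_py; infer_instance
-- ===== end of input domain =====

-- B does the same job as A by a different decomposition: one cleaning pass, then repeated
-- splitting at the first ';' line, instead of A's accumulate-and-flush loop (objective: alternative).

-- ===== PORT A =====
-- sql.split("\n"): Str.split? is none only for sep = "", so .getD [] is exact here.
def split_sql_py (sql : String) : List String :=
  let p := ((PySem.Str.split? sql "\n").getD []).foldl
    (fun (st : List String × List String) line0 =>
      let line := PySem.Str.strip line0
      if line == "" || PySem.Str.startswith line "--" then st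
      else
        let cur := st.2 ++ [line]
        if PySem.Str.endswith line ";" then (st.1 ++ [PySem.Str.join "\n" cur], ([] : List String))
        else (st.1, cur)) ([], [])
  if p.2 ≠ [] then p.1 ++ [PySem.Str.join "\n" p.2] else p.1

-- ===== PORT B =====
-- the while-loop of Source B: cut the cleaned list at the first ';'-terminated line, repeat
def splitRec (lines : List String) : List String :=
  if lines = [] then []
  else
    match List.findIdx? (fun s => PySem.Str.endswith s ";") lines with
    | none => [PySem.Str.join "\n" lines]
    | some j => PySem.Str.join "\n" (lines.take (j + 1)) :: splitRec (lines.drop (j + 1))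
termination_by lines.length
decreasing_by
  simp only [List.length_drop]
  cases lines with
  | nil => simp_all
  | cons a t => simp

def split_sql_py_alt (sql : String) : List String :=
  splitRec ((((PySem.Str.split? sql "\n").getD []).map PySem.Str.strip).filter
    (fun l => !(l == "" || PySem.Str.startswith l "--")))

-- ===== PRECONDITION & SPEC =====
def Spec_split_sql_py (sql : String) (out : List String) : Prop := out = split_sql_py_alt sql
instance (sql : String) (out : List String) : Decidable (Spec_split_sql_py sql out) := by unfold Spec_split_sql_py; infer_instance

-- ===== CLAIM (what is proved, stated in full; the proofs are below) =====
def Claim_equal_split_sql_py : Prop := ∀ (sql : String), Dom_split_sql_py sql → Spec_split_sql_py sql (split_sql_py sql)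

-- ===== LEMMAS AND PROOFS =====

-- A's loop body on the cleaned list
def pvCore (st : List String × List String) (line : String) : List String × List String :=
  if PySem.Str.endswith line ";" then (st.1 ++ [PySem.Str.join "\n" (st.2 ++ [line])], [])
  else (st.1, st.2 ++ [line])

-- A's post-loop flush
def pvFinish (st : List String × List String) : List String :=
  if st.2 ≠ [] then st.1 ++ [PySem.Str.join "\n" st.2] else st.1

-- A's raw-line loop is the pvCore loop over the cleaned (stripped, filtered) lines
lemma foldA_clean (ls : List String) (st : List String × List String) :
    ls.foldl (fun (st : List String × List String) line0 =>
      let line := PySem.Str.strip line0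
      if line == "" || PySem.Str.startswith line "--" then st
      else
        let cur := st.2 ++ [line]
        if PySem.Str.endswith line ";" then (st.1 ++ [PySem.Str.join "\n" cur], ([] : List String))
        else (st.1, cur)) st
    = ((ls.map PySem.Str.strip).filter
        (fun l => !(l == "" || PySem.Str.startswith l "--"))).foldl pvCore st := by
  induction ls generalizing st with
  | nil => rfl
  | cons a t ih =>
    rw [List.map_cons, List.filter_cons, List.foldl_cons, ih]
    by_cases hc : (PySem.Str.strip a == "" || PySem.Str.startswith (PySem.Str.strip a) "--") = true
    · rw [if_pos hc, hc]
      rfl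
    · rw [if_neg hc]
      rw [Bool.not_eq_true] at hc
      rw [hc]
      rfl

lemma findIdx_boundary (cur : List String) (l : String) (cs : List String)
    (hcur : ∀ x ∈ cur, PySem.Str.endswith x ";" = false)
    (hl : PySem.Str.endswith l ";" = true) :
    List.findIdx? (fun s => PySem.Str.endswith s ";") (cur ++ l :: cs) = some cur.length := by
  induction cur with
  | nil =>
    rw [List.nil_append, List.findIdx?_cons, if_pos hl]
    rfl
  | cons a t ih =>
    rw [List.cons_append, List.findIdx?_cons, if_neg (by rw [hcur a (by simp)]; simp),
      ih (fun x hx => hcur x (by simp [hx]))]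
    rfl

lemma splitRec_no_semi (cur : List String) (hne : cur ≠ [])
    (hcur : ∀ x ∈ cur, PySem.Str.endswith x ";" = false) :
    splitRec cur = [PySem.Str.join "\n" cur] := by
  rw [splitRec, if_neg hne, List.findIdx?_eq_none_iff.mpr hcur]

lemma splitRec_boundary (cur : List String) (l : String) (cs : List String)
    (hcur : ∀ x ∈ cur, PySem.Str.endswith x ";" = false)
    (hl : PySem.Str.endswith l ";" = true) :
    splitRec (cur ++ l :: cs)
      = PySem.Str.join "\n" (cur ++ [l]) :: splitRec cs := by
  rw [splitRec, if_neg (by simp : cur ++ l :: cs ≠ []),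
    findIdx_boundary cur l cs hcur hl]
  have h1 : List.take (cur.length + 1) (cur ++ l :: cs) = cur ++ [l] := by
    rw [show cur ++ l :: cs = (cur ++ [l]) ++ cs by simp, List.take_left' (by simp)]
  have h2 : List.drop (cur.length + 1) (cur ++ l :: cs) = cs := by
    rw [show cur ++ l :: cs = (cur ++ [l]) ++ cs by simp, List.drop_left' (by simp)]
  show PySem.Str.join "\n" (List.take (cur.length + 1) (cur ++ l :: cs))
      :: splitRec (List.drop (cur.length + 1) (cur ++ l :: cs)) = _
  rw [h1, h2]

-- the accumulate-and-flush loop equals the repeated first-';' splitting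
lemma flush_eq_splitRec (cs : List String) : ∀ (cur stmts : List String),
    (∀ x ∈ cur, PySem.Str.endswith x ";" = false) →
    pvFinish (cs.foldl pvCore (stmts, cur)) = stmts ++ splitRec (cur ++ cs) := by
  induction cs with
  | nil =>
    intro cur stmts hcur
    rw [List.foldl_nil, List.append_nil]
    by_cases hc : cur = []
    · subst hc
      rw [splitRec, if_pos rfl]
      simp [pvFinish]
    · rw [splitRec_no_semi cur hc hcur]
      simp [pvFinish, hc]
  | cons l cs ih =>
    intro cur stmts hcur
    rw [List.foldl_cons]
    by_cases hl : PySem.Str.endswith l ";" = true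
    · have hstep : pvCore (stmts, cur) l
          = (stmts ++ [PySem.Str.join "\n" (cur ++ [l])], []) := by
        simp only [pvCore]
        rw [if_pos hl]
      rw [hstep, ih [] _ (by simp), splitRec_boundary cur l cs hcur hl]
      simp
    · have hstep : pvCore (stmts, cur) l = (stmts, cur ++ [l]) := by
        simp only [pvCore]
        rw [if_neg hl]
      rw [hstep, ih (cur ++ [l]) stmts
        (by intro x hx
            rcases List.mem_append.mp hx with h | h
            · exact hcur x h
            · simp only [List.mem_singleton] at h
              subst h
              simpa using hl)]
      rw [List.append_assoc, List.singleton_append]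

-- ===== VERDICT (by name: the statement is the Claim_ definition above) =====
theorem split_sql_py_spec : Claim_equal_split_sql_py := by
  intro sql _
  show split_sql_py sql = split_sql_py_alt sql
  unfold split_sql_py split_sql_py_alt
  rw [foldA_clean]
  have h := flush_eq_splitRec
    ((((PySem.Str.split? sql "\n").getD []).map PySem.Str.strip).filter
      (fun l => !(l == "" || PySem.Str.startswith l "--"))) [] [] (by simp)
  simpa [pvFinish] using h
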